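-- pv_equiv track=rewrite | github.com/riccardomurri/j2pp | j2pp.py | split_dot_or_dict_syntax
-- ===== SOURCE A (Python) =====
-- def split_dot_or_dict_syntax(expr):
--     """
--     Split a dotted or []-lookup expression into a series of components.
--
--     Examples::
--
--       >>> split_dot_or_dict_syntax('a.b.c')
--       ['a', 'b', 'c']
--       >>> split_dot_or_dict_syntax('a.b[c]')
--       ['a', 'b', 'c']
--       >>> split_dot_or_dict_syntax('a[b].c')
--       ['a', 'b', 'c']
--
--     Only outermost brackets are taken as a dict-style lookup
--     expression; any string appearing within the outermost pair of
--     brackets is taken as a single component (including dots and other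
--     brackets!).
--
--     ::
--
--       >>> split_dot_or_dict_syntax('a[b[1]].c')
--       ['a', 'b[1]', 'c']
--       >>> split_dot_or_dict_syntax('a.b[c[1].d].e')
--       ['a', 'b', 'c[1].d', 'e']
--
--     Note that (as a consequence of the above), brackets must be
--     balanced, i.e., any open bracket must have a matching close one;
--     otherwise, an `AssertionError` is raised::
--
--       >>> split_dot_or_dict_syntax('a[b[1].c')
--       Traceback (most recent call last):
--         ...
--       AssertionError
--
--     """
--     result = []
--     cur = ''
--     nested = 0
--     for ch in expr:
--         if '.' == ch:
--             if nested != 0: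
--                 cur += ch
--             else:
--                 if cur:
--                     result.append(cur)
--                     cur = ''
--         elif '[' == ch:
--             if nested != 0:
--                 cur += ch
--             else:
--                 if cur:
--                     result.append(cur)
--                     cur = ''
--             nested += 1
--         elif ']' == ch:
--             nested -= 1
--             if nested != 0:
--                 cur += ch
--             else:
--                 if cur:
--                     result.append(cur)
--                     cur = ''
--         else:
--             cur += ch
--     assert nested == 0
--     if cur:
--         result.append(cur)
--     return result
-- ===== SOURCE B (Python) =====
-- def split_dot_or_dict_syntax(expr):
--     # Boundary-index pass: record top-level delimiter positions, then slice between them.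
--     depth = 0
--     cuts = [-1]
--     for i, ch in enumerate(expr):
--         if ch == '[':
--             if depth == 0:
--                 cuts.append(i)
--             depth += 1
--         elif ch == ']':
--             depth -= 1
--             if depth == 0:
--                 cuts.append(i)
--         elif ch == '.' and depth == 0:
--             cuts.append(i)
--     assert depth == 0
--     cuts.append(len(expr))
--     return [p for p in (expr[a + 1:b] for a, b in zip(cuts, cuts[1:])) if p]
-- ===== Notes on version B (the rewrite author's own statement) =====
-- stated objective: alternative
-- what changed: Instead of accumulating the current component character by character, B scans once recording the indices of top-level delimiters ('.', '[' at depth 0, ']' returning to depth 0) and then slices the string between consecutive cut points, keeping non-empty slices.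
import Mathlib
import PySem

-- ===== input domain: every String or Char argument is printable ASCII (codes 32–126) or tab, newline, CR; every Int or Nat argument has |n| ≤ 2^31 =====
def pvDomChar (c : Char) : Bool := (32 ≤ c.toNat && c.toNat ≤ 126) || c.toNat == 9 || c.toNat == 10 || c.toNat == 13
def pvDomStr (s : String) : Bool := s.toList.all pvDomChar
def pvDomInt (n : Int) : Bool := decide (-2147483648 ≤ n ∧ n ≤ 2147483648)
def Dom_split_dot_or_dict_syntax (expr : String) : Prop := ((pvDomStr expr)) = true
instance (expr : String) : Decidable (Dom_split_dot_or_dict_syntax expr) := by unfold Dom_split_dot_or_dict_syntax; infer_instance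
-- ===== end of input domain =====

-- B replaces A's character-accumulating pass by a top-level-delimiter index pass plus slicing
-- between consecutive cut points (objective: alternative decomposition, similar cost).

-- ===== PORT A =====
def pvAStep (st : List String × List Char × Int) (ch : Char) : List String × List Char × Int :=
  match st with
  | (result, cur, nested) =>
    if ch = '.' then
      if nested ≠ 0 then (result, cur ++ [ch], nested)
      else if cur ≠ [] then (result ++ [String.ofList cur], [], nested)
      else (result, cur, nested)
    else if ch = '[' then
      if nested ≠ 0 then (result, cur ++ [ch], nested + 1)
      else if cur ≠ [] then (result ++ [String.ofList cur], [], nested + 1)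
      else (result, cur, nested + 1)
    else if ch = ']' then
      if nested - 1 ≠ 0 then (result, cur ++ [ch], nested - 1)
      else if cur ≠ [] then (result ++ [String.ofList cur], [], nested - 1)
      else (result, cur, nested - 1)
    else (result, cur ++ [ch], nested)

def split_dot_or_dict_syntax (expr : String) : List String :=
  match expr.toList.foldl pvAStep ([], [], 0) with
  | (result, cur, _) => if cur ≠ [] then result ++ [String.ofList cur] else result

-- ===== PORT B =====
-- the 'for i, ch in enumerate(expr)' loop collecting top-level delimiter indices
def pvBCuts : List Char → Nat → Int → List Int
  | [], _, _ => []
  | ch :: t, i, depth =>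
    if ch = '[' then
      (if depth = 0 then [(i : Int)] else []) ++ pvBCuts t (i + 1) (depth + 1)
    else if ch = ']' then
      (if depth - 1 = 0 then [(i : Int)] else []) ++ pvBCuts t (i + 1) (depth - 1)
    else if ch = '.' ∧ depth = 0 then (i : Int) :: pvBCuts t (i + 1) depth
    else pvBCuts t (i + 1) depth

-- '[p for p in (expr[a+1:b] for a, b in zip(cuts, cuts[1:])) if p]'
def pvBSlices (cs : List Char) (cuts : List Int) : List String :=
  (cuts.zip cuts.tail).filterMap (fun p =>
    let piece := PySem.List.slice cs (some (p.1 + 1)) (some p.2)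
    if piece ≠ [] then some (String.ofList piece) else none)

def split_dot_or_dict_syntax_alt (expr : String) : List String :=
  let cs := expr.toList
  pvBSlices cs ((-1 : Int) :: pvBCuts cs 0 0 ++ [(cs.length : Int)])

-- ===== PRECONDITION & SPEC =====
-- Pre_ excludes exactly the unbalanced-bracket inputs on which A (and B) raise AssertionError.
def Pre_split_dot_or_dict_syntax (expr : String) : Prop :=
  expr.toList.count '[' = expr.toList.count ']'
instance (expr : String) : Decidable (Pre_split_dot_or_dict_syntax expr) := by
  unfold Pre_split_dot_or_dict_syntax; infer_instance

def pvWitness_split_dot_or_dict_syntax : String := "a.b[c[1].d].e"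

def Spec_split_dot_or_dict_syntax (expr : String) (out : List String) : Prop := out = split_dot_or_dict_syntax_alt expr
instance (expr : String) (out : List String) : Decidable (Spec_split_dot_or_dict_syntax expr out) := by unfold Spec_split_dot_or_dict_syntax; infer_instance

-- ===== CLAIM (what is proved, stated in full; the proofs are below) =====
def Claim_equal_split_dot_or_dict_syntax : Prop := ∀ (expr : String), Dom_split_dot_or_dict_syntax expr → Pre_split_dot_or_dict_syntax expr → Spec_split_dot_or_dict_syntax expr (split_dot_or_dict_syntax expr)

-- ===== LEMMAS AND PROOFS =====

def pvFinish (st : List String × List Char × Int) : List String :=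
  if st.2.1 ≠ [] then st.1 ++ [String.ofList st.2.1] else st.1

-- reference recursion: components of t given pending chars cur and current depth
def pvSpecA : List Char → List Char → Int → List String
  | [], cur, _ => if cur ≠ [] then [String.ofList cur] else []
  | ch :: t, cur, nested =>
    if ch = '.' then
      if nested ≠ 0 then pvSpecA t (cur ++ [ch]) nested
      else (if cur ≠ [] then [String.ofList cur] else []) ++ pvSpecA t [] nested
    else if ch = '[' then
      if nested ≠ 0 then pvSpecA t (cur ++ [ch]) (nested + 1)
      else (if cur ≠ [] then [String.ofList cur] else []) ++ pvSpecA t [] (nested + 1)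
    else if ch = ']' then
      if nested - 1 ≠ 0 then pvSpecA t (cur ++ [ch]) (nested - 1)
      else (if cur ≠ [] then [String.ofList cur] else []) ++ pvSpecA t [] (nested - 1)
    else pvSpecA t (cur ++ [ch]) nested

lemma pvA_eq_spec (t : List Char) : ∀ (result : List String) (cur : List Char) (nested : Int),
    pvFinish (t.foldl pvAStep (result, cur, nested)) = result ++ pvSpecA t cur nested := by
  induction t with
  | nil =>
    intro result cur nested
    simp only [List.foldl_nil, pvSpecA, pvFinish]
    split <;> simp
  | cons ch t ih =>
    intro result cur nested
    simp only [List.foldl_cons, pvSpecA, pvAStep]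
    split_ifs <;> rw [ih] <;> simp_all

lemma pvBSlices_cons_cons (cs : List Char) (x y : Int) (rest : List Int) :
    pvBSlices cs (x :: y :: rest) =
      (if PySem.List.slice cs (some (x + 1)) (some y) ≠ [] then
        [String.ofList (PySem.List.slice cs (some (x + 1)) (some y))] else [])
      ++ pvBSlices cs (y :: rest) := by
  simp only [pvBSlices, List.tail_cons, List.zip_cons_cons, List.filterMap_cons]
  split <;> simp_all

lemma pvB_eq_spec (cs : List Char) : ∀ (t : List Char) (i : Nat) (a d : Int),
    t = cs.drop i → i ≤ cs.length → -1 ≤ a → a < (i : Int) →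
    pvBSlices cs (a :: pvBCuts t i d ++ [(cs.length : Int)])
      = pvSpecA t ((cs.drop (a + 1).toNat).take (i - (a + 1).toNat)) d := by
  intro t
  induction t with
  | nil =>
    intro i a d ht hi ha hai
    have hlen : cs.length ≤ i := by
      by_contra h
      have := ht.symm
      rw [List.drop_eq_nil_iff] at this
      omega
    have hieq : i = cs.length := le_antisymm hi hlen
    have h0 : (0:Int) ≤ a + 1 := by omega
    have h1 : (0:Int) ≤ (cs.length : Int) := by positivity
    rw [show (a :: pvBCuts ([] : List Char) i d ++ [(cs.length : Int)])
        = [a, (cs.length : Int)] by simp [pvBCuts]]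
    rw [pvBSlices_cons_cons]
    simp only [PySem.List.slice_toNat cs h0 h1]
    simp [pvBSlices, pvSpecA, hieq]
  | cons ch t ih =>
    intro i a d ht hi ha hai
    have hlt : i < cs.length := by
      by_contra h
      have hnil : cs.drop i = [] := List.drop_eq_nil_iff.mpr (by omega)
      rw [hnil] at ht
      exact List.cons_ne_nil _ _ ht
    have hsplit : ch = cs[i] ∧ t = cs.drop (i + 1) := by
      have hg := List.getElem_cons_drop hlt
      rw [← hg] at ht
      exact List.cons_eq_cons.mp ht
    have hch : ch = cs[i] := hsplit.1
    have ht' : t = cs.drop (i + 1) := hsplit.2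
    have hcur : ∀ s : Nat, s ≤ i →
        (cs.drop s).take (i + 1 - s) = (cs.drop s).take (i - s) ++ [cs[i]] := by
      intro s hs
      have h1 : i + 1 - s = (i - s) + 1 := by omega
      rw [h1, List.take_succ]
      congr 1
      have h2 : (cs.drop s)[i - s]? = cs[s + (i - s)]? := List.getElem?_drop ..
      have h3 : s + (i - s) = i := by omega
      rw [h2, h3, List.getElem?_eq_getElem hlt]
      rfl
    have hslice : PySem.List.slice cs (some (a + 1)) (some (i : Int))
        = (cs.drop (a + 1).toNat).take ((i : Int).toNat - (a + 1).toNat) := by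
      exact PySem.List.slice_toNat cs (by omega) (by positivity)
    have hcut : ∀ d' : Int,
        pvBSlices cs (a :: ((i : Int) :: (pvBCuts t (i + 1) d' ++ [(cs.length : Int)])))
          = (if ((cs.drop (a + 1).toNat).take (i - (a + 1).toNat)) ≠ [] then
              [String.ofList ((cs.drop (a + 1).toNat).take (i - (a + 1).toNat))] else [])
            ++ pvSpecA t [] d' := by
      intro d'
      have hrec := ih (i + 1) (i : Int) d' ht' (by omega) (by omega) (by omega)
      have he : ((i : Int) + 1).toNat = i + 1 := by omega
      rw [he] at hrec
      simp only [Nat.sub_self, List.take_zero, List.cons_append] at hrec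
      simp only [pvBSlices_cons_cons, hslice, Int.toNat_natCast, hrec]
    have hnocut : ∀ d' : Int,
        pvBSlices cs (a :: pvBCuts t (i + 1) d' ++ [(cs.length : Int)])
          = pvSpecA t ((cs.drop (a + 1).toNat).take (i - (a + 1).toNat) ++ [cs[i]]) d' := by
      intro d'
      have hrec := ih (i + 1) a d' ht' (by omega) ha (by omega)
      rw [hrec, hcur (a + 1).toNat (by omega)]
    by_cases h1 : ch = '.'
    · subst h1
      by_cases hd : d = 0
      · subst hd
        have e1 : pvBCuts ('.' :: t) i 0 = (i : Int) :: pvBCuts t (i + 1) 0 := by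
          simp [pvBCuts]
        have e2 : ∀ cur : List Char, pvSpecA ('.' :: t) cur 0 =
            (if cur ≠ [] then [String.ofList cur] else []) ++ pvSpecA t [] 0 := by
          intro cur; simp [pvSpecA]
        rw [e1, e2]
        simp only [List.cons_append]
        exact hcut 0
      · have e1 : pvBCuts ('.' :: t) i d = pvBCuts t (i + 1) d := by
          simp [pvBCuts, hd]
        have e2 : ∀ cur : List Char, pvSpecA ('.' :: t) cur d =
            pvSpecA t (cur ++ ['.']) d := by
          intro cur; simp [pvSpecA, hd]
        rw [e1, e2, hch]
        simp only [List.cons_append]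
        exact hnocut d
    · by_cases h2 : ch = '['
      · subst h2
        by_cases hd : d = 0
        · subst hd
          have e1 : pvBCuts ('[' :: t) i 0 = (i : Int) :: pvBCuts t (i + 1) (0 + 1) := by
            simp [pvBCuts]
          have e2 : ∀ cur : List Char, pvSpecA ('[' :: t) cur 0 =
              (if cur ≠ [] then [String.ofList cur] else []) ++ pvSpecA t [] (0 + 1) := by
            intro cur; simp [pvSpecA]
          rw [e1, e2]
          simp only [List.cons_append]
          exact hcut (0 + 1)
        · have e1 : pvBCuts ('[' :: t) i d = pvBCuts t (i + 1) (d + 1) := by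
            simp [pvBCuts, hd]
          have e2 : ∀ cur : List Char, pvSpecA ('[' :: t) cur d =
              pvSpecA t (cur ++ ['[']) (d + 1) := by
            intro cur; simp [pvSpecA, hd]
          rw [e1, e2, hch]
          simp only [List.cons_append]
          exact hnocut (d + 1)
      · by_cases h3 : ch = ']'
        · subst h3
          by_cases hd : d - 1 = 0
          · have e1 : pvBCuts (']' :: t) i d = (i : Int) :: pvBCuts t (i + 1) (d - 1) := by
              simp [pvBCuts, hd]
            have e2 : ∀ cur : List Char, pvSpecA (']' :: t) cur d =
                (if cur ≠ [] then [String.ofList cur] else []) ++ pvSpecA t [] (d - 1) := by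
              intro cur; simp [pvSpecA, hd]
            rw [e1, e2]
            simp only [List.cons_append]
            exact hcut (d - 1)
          · have e1 : pvBCuts (']' :: t) i d = pvBCuts t (i + 1) (d - 1) := by
              simp [pvBCuts, hd]
            have e2 : ∀ cur : List Char, pvSpecA (']' :: t) cur d =
                pvSpecA t (cur ++ [']']) (d - 1) := by
              intro cur; simp [pvSpecA, hd]
            rw [e1, e2, hch]
            simp only [List.cons_append]
            exact hnocut (d - 1)
        · have e1 : pvBCuts (ch :: t) i d = pvBCuts t (i + 1) d := by
            simp [pvBCuts, h1, h2, h3]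
          have e2 : ∀ cur : List Char, pvSpecA (ch :: t) cur d =
              pvSpecA t (cur ++ [ch]) d := by
            intro cur; simp [pvSpecA, h1, h2, h3]
          rw [e1, e2, hch]
          simp only [List.cons_append]
          exact hnocut d

-- ===== VERDICT (by name: the statement is the Claim_ definition above) =====
theorem split_dot_or_dict_syntax_spec : Claim_equal_split_dot_or_dict_syntax := by
  intro expr _ _
  unfold Spec_split_dot_or_dict_syntax
  have hA0 : split_dot_or_dict_syntax expr = pvFinish (expr.toList.foldl pvAStep ([], [], 0)) := rfl
  unfold split_dot_or_dict_syntax_alt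
  rw [hA0]
  have hA := pvA_eq_spec expr.toList [] [] 0
  have hB := pvB_eq_spec expr.toList expr.toList 0 (-1) 0 rfl (by omega) (by omega) (by omega)
  simp only [List.nil_append] at hA
  rw [hA]
  simp only [show ((-1 : Int) + 1).toNat = 0 by omega, List.drop_zero, Nat.sub_zero,
    List.take_zero] at hB
  exact hB.symm
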